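-- pv_equiv track=rewrite | github.com/vrthra/mimid | Cmimid/src/pta.py | detect_chunks
-- ===== SOURCE A (Python) =====
-- class Buf:
--     def __init__(self, size):
--         self.size = size
--         self.items = [None] * self.size
--
--     def add1(self, items):
--         self.items.append(items.pop(0))
--         return self.items.pop(0)
--
--     def __eq__(self, items):
--         if any(isinstance(i, dict) for i in self.items): return False
--         if any(isinstance(i, dict) for i in items): return False
--         return items == self.items
--
-- def detect_chunks(n, lst_):
--     lst = list(lst_)
--     chunks = set()
--     last = Buf(n)
--     # check if the next_n elements are repeated.
--     for _ in range(len(lst) - n):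
--         lnext_n = lst[0:n]
--         if last == lnext_n:
--             # found a repetition.
--             chunks.add(tuple(last.items))
--         else:
--             pass
--         last.add1(lst)
--     return chunks
-- ===== SOURCE B (Python) =====
-- def detect_chunks(n, lst_):
--     m = len(lst_)
--     return {tuple(lst_[j:j + n])
--             for j in range(m - 2 * n)
--             if lst_[j:j + n] == lst_[j + n:j + 2 * n]}
-- ===== Notes on version B (the rewrite author's own statement) =====
-- stated objective: faster
-- what changed: A simulates the previous window with a Buf object of Nones that is updated by popping from a consumed copy of the list; B drops the mutable buffer entirely and directly compares the two adjacent length-n slices at each offset in one set comprehension.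
import Mathlib
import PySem

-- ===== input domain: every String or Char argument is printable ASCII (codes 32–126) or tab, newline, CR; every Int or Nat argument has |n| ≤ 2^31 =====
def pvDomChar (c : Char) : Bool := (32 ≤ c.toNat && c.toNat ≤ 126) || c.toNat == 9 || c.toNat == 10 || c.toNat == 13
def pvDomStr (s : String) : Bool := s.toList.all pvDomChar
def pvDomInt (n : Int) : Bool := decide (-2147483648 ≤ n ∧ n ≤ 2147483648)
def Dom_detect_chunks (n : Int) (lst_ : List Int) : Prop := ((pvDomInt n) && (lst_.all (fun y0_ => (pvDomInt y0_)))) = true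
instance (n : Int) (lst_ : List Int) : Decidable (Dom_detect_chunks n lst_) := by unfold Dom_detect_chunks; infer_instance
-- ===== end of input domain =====

-- B replaces A's sliding Buf with pops by a direct comparison of the two adjacent length-n
-- windows at each offset (simpler, one set comprehension); return value only — A also consumes
-- its local copy of the list, which no caller observes.

-- ===== PORT A =====
-- Buf.items holds None-or-int values, so it is a List (Option Int); the `isinstance(i, dict)`
-- guards in Buf.__eq__ are identically False for int/None elements (exact on this Int domain),
-- leaving the plain list equality.  One loop iteration: compare, then Buf.add1 (two pops).
def detect_chunks_go (n : Int) :
    Nat → List Int → List (Option Int) → PySem.Set (List (Option Int)) →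
    PySem.Set (List (Option Int))
  | 0, _, _, chunks => chunks
  | k + 1, lst, items, chunks =>
    let lnext_n := PySem.List.slice lst (some 0) (some n)
    let chunks' := if items = lnext_n.map some then PySem.Set.add chunks items else chunks
    match PySem.List.pop? lst 0 with
    | none => chunks'            -- lst.pop(0) on empty list: Python raises IndexError (outside Pre_)
    | some (x, lst') =>
      match PySem.List.pop? (items ++ [some x]) 0 with
      | none => chunks'          -- unreachable: the popped list is nonempty
      | some (_, items') => detect_chunks_go n k lst' items' chunks'

def detect_chunks (n : Int) (lst_ : List Int) : List (List (Option Int)) :=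
  detect_chunks_go n ((lst_.length : Int) - n).toNat lst_ (List.replicate n.toNat none) PySem.Set.empty

-- ===== PORT B =====
-- set comprehension over range(m - 2n) → fold with Set.add in j order (a set's build order is
-- not observable in the result; the insertion order here matches A's, so the lists agree).
def detect_chunks_alt (n : Int) (lst_ : List Int) : List (List (Option Int)) :=
  let m : Int := lst_.length
  (PySem.List.pyRange 0 (m - 2 * n) 1).foldl
    (fun chunks j =>
      if PySem.List.slice lst_ (some j) (some (j + n)) =
         PySem.List.slice lst_ (some (j + n)) (some (j + 2 * n)) then
        PySem.Set.add chunks ((PySem.List.slice lst_ (some j) (some (j + n))).map some)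
      else chunks)
    PySem.Set.empty

-- ===== PRECONDITION & SPEC =====
-- Pre_ excludes n < 0, on which A always raises IndexError (lst.pop(0) runs past the list).
def Pre_detect_chunks (n : Int) (lst_ : List Int) : Prop := 0 ≤ n
instance (n : Int) (lst_ : List Int) : Decidable (Pre_detect_chunks n lst_) := by
  unfold Pre_detect_chunks; infer_instance

def pvWitness_detect_chunks : Int × List Int := (1, [5, 5, 5])

def Spec_detect_chunks (n : Int) (lst_ : List Int) (out : List (List (Option Int))) : Prop := out = detect_chunks_alt n lst_
instance (n : Int) (lst_ : List Int) (out : List (List (Option Int))) : Decidable (Spec_detect_chunks n lst_ out) := by unfold Spec_detect_chunks; infer_instance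

-- ===== CLAIM (what is proved, stated in full; the proofs are below) =====
def Claim_equal_detect_chunks : Prop := ∀ (n : Int) (lst_ : List Int), Dom_detect_chunks n lst_ → Pre_detect_chunks n lst_ → Spec_detect_chunks n lst_ (detect_chunks n lst_)

-- ===== LEMMAS AND PROOFS =====

-- Common reference loop: one step compares the front length-nn window of P with the next one
-- and drops the head of P.  (P plays the role of "nn Nones ++ the list", read left to right;
-- A's Buf state is P's front window, B's offsets index into P past the Nones.)
def dcSpec (nn : Nat) : Nat → List (Option Int) → PySem.Set (List (Option Int)) →
    PySem.Set (List (Option Int))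
  | 0, _, C => C
  | k + 1, P, C =>
    dcSpec nn k (P.drop 1)
      (if P.take nn = (P.drop nn).take nn then PySem.Set.add C (P.take nn) else C)

theorem goA_eq_dcSpec (nn : Nat) :
    ∀ (k : Nat) (P : List (Option Int)) (L : List Int) (C : PySem.Set (List (Option Int))),
      L.map some = P.drop nn → k ≤ L.length →
      detect_chunks_go (nn : Int) k L (P.take nn) C = dcSpec nn k P C := by
  intro k
  induction k with
  | zero => intro P L C _ _; rfl
  | succ k ih =>
    intro P L C hPL hk
    cases L with
    | nil => simp at hk
    | cons x L' =>
      cases P with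
      | nil => simp at hPL
      | cons p Pt =>
        have hget : (p :: Pt).take nn ++ [some x] = (p :: Pt).take (nn + 1) := by
          rw [List.take_add_one]
          have h0 : (p :: Pt)[nn]? = some (some x) := by
            have : (List.drop nn (p :: Pt))[0]? = (p :: Pt)[nn + 0]? := List.getElem?_drop
            rw [← hPL] at this
            simpa using this.symm
          simp [h0]
        have hdrop1 : (L'.map some) = Pt.drop nn := by
          have := congrArg List.tail hPL
          simpa [List.tail_drop] using this
        simp only [detect_chunks_go, dcSpec,
          PySem.List.slice_zero_start, PySem.List.slice_to_natCast,
          PySem.List.pop?_zero_cons]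
        rw [show ((x :: L').take nn).map some = ((p :: Pt).drop nn).take nn by
              rw [← hPL, List.map_take]]
        rw [hget]
        rw [show (p :: Pt).take (nn + 1) = p :: Pt.take nn from by simp [List.take_succ_cons]]
        rw [PySem.List.pop?_zero_cons]
        simp only [List.drop_one, List.tail_cons]
        exact ih Pt L' _ hdrop1 (by simpa using hk)

theorem dcSpec_eq_foldl_range (nn : Nat) :
    ∀ (k : Nat) (P : List (Option Int)) (C : PySem.Set (List (Option Int))),
      dcSpec nn k P C =
        (List.range k).foldl
          (fun C i => if (P.drop i).take nn = (P.drop (i + nn)).take nn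
            then PySem.Set.add C ((P.drop i).take nn) else C) C := by
  intro k
  induction k with
  | zero => intro P C; rfl
  | succ k ih =>
    intro P C
    rw [List.range_succ_eq_map, List.foldl_cons, List.foldl_map]
    simp only [List.drop_zero, Nat.zero_add]
    rw [dcSpec, ih]
    congr 1
    funext C i
    have h1 : P.drop (i + 1) = (P.drop 1).drop i := by rw [List.drop_drop, Nat.add_comm]
    have h2 : P.drop (i + 1 + nn) = (P.drop 1).drop (i + nn) := by
      rw [List.drop_drop]; congr 1; omega
    simp only [Nat.succ_eq_add_one]
    rw [h1, h2]

-- B's fold, with both slices rewritten to drop/take at Nat offsets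
theorem altB_eq_foldl_range (nn : Nat) (lst_ : List Int) :
    detect_chunks_alt (nn : Int) lst_ =
      (List.range (lst_.length - 2 * nn)).foldl
        (fun C j => if (lst_.drop j).take nn = (lst_.drop (j + nn)).take nn
          then PySem.Set.add C (((lst_.drop j).take nn).map some) else C)
        PySem.Set.empty := by
  simp only [detect_chunks_alt]
  rw [PySem.List.pyRange_one]
  rw [show (((lst_.length : Int) - 2 * (nn:Int)) - 0).toNat = lst_.length - 2 * nn by omega]
  rw [List.foldl_map]
  congr 1
  funext C k
  rw [show (0:Int) + (k:Int) = ((k:Nat):Int) by ring]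
  rw [PySem.List.slice_natCast_add]
  rw [show ((k:Int) + (nn:Int)) = (((k+nn : Nat)):Int) by push_cast; ring]
  rw [show ((k:Int) + 2 * (nn:Int)) = (((k+nn : Nat)):Int) + ((nn:Nat):Int) by push_cast; ring]
  rw [PySem.List.slice_natCast_add]

theorem drop_pad (nn i : Nat) (h : i ≤ nn) (l2 : List (Option Int)) :
    (List.replicate nn (none : Option Int) ++ l2).drop i = List.replicate (nn - i) none ++ l2 := by
  rw [List.drop_append_of_le_length (by simp [h]), List.drop_replicate]

theorem drop_pad_past (nn j : Nat) (l2 : List (Option Int)) :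
    (List.replicate nn (none : Option Int) ++ l2).drop (nn + j) = l2.drop j := by
  rw [List.drop_append]
  simp

-- at offsets still inside the None padding, A's comparison never succeeds
theorem dcCondFalse (nn i : Nat) (lst_ : List Int) (h : i < nn) :
    ((List.replicate nn (none : Option Int) ++ lst_.map some).drop i).take nn ≠
      ((List.replicate nn (none : Option Int) ++ lst_.map some).drop (i + nn)).take nn := by
  intro heq
  have hL : (((List.replicate nn (none : Option Int) ++ lst_.map some).drop i).take nn)[0]? = some none := by
    rw [drop_pad nn i (le_of_lt h), List.getElem?_take_of_lt (by omega)]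
    rw [List.getElem?_append_left (by simp; omega)]
    simp [Nat.sub_pos_of_lt h]
  have hR : (((List.replicate nn (none : Option Int) ++ lst_.map some).drop (i + nn)).take nn)[0]? ≠ some (none : Option Int) := by
    rw [show i + nn = nn + i by omega, drop_pad_past, ← List.map_drop, ← List.map_take]
    intro hc
    rcases List.getElem?_eq_some_iff.mp (by simpa using hc) with ⟨hlt, hx⟩
    simp at hx
  rw [heq] at hL
  exact hR hL

-- past the padding, A's comparison and accumulation coincide with B's at offset j
theorem dcCondShift (nn j : Nat) (lst_ : List Int) (C : PySem.Set (List (Option Int))) :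
    (if (((List.replicate nn (none : Option Int) ++ lst_.map some).drop (nn + j)).take nn =
          ((List.replicate nn (none : Option Int) ++ lst_.map some).drop (nn + j + nn)).take nn)
      then PySem.Set.add C (((List.replicate nn (none : Option Int) ++ lst_.map some).drop (nn + j)).take nn) else C) =
    (if (lst_.drop j).take nn = (lst_.drop (j + nn)).take nn
      then PySem.Set.add C (((lst_.drop j).take nn).map some) else C) := by
  rw [drop_pad_past, show nn + j + nn = nn + (j + nn) by omega, drop_pad_past,
    ← List.map_drop, ← List.map_drop, ← List.map_take, ← List.map_take]
  rw [if_congr (List.map_inj_right (fun _ _ h => Option.some_injective _ h)) rfl rfl]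

-- a segment of noop iterations inside the padding folds to the accumulator
theorem foldl_range_pad (nn : Nat) (lst_ : List Int) (C : PySem.Set (List (Option Int))) :
    ∀ (t : Nat), t ≤ nn →
      (List.range t).foldl
        (fun C i => if ((List.replicate nn (none : Option Int) ++ lst_.map some).drop i).take nn =
            ((List.replicate nn (none : Option Int) ++ lst_.map some).drop (i + nn)).take nn
          then PySem.Set.add C (((List.replicate nn (none : Option Int) ++ lst_.map some).drop i).take nn) else C) C = C := by
  intro t
  induction t with
  | zero => intro _; rfl
  | succ t ih =>
    intro ht
    rw [List.range_succ, List.foldl_append, ih (by omega), List.foldl_cons, List.foldl_nil,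
      if_neg (dcCondFalse nn t lst_ (by omega))]


theorem detect_chunks_spec : Claim_equal_detect_chunks := by
  intro n lst_ _ hp
  unfold Spec_detect_chunks
  obtain ⟨nn, rfl⟩ : ∃ k : Nat, n = (k : Int) := ⟨n.toNat, (Int.toNat_of_nonneg hp).symm⟩
  unfold detect_chunks
  rw [show ((nn : Int)).toNat = nn by simp]
  rw [show (((lst_.length : Int)) - (nn : Int)).toNat = lst_.length - nn by omega]
  rw [show List.replicate nn (none : Option Int) =
        (List.replicate nn (none : Option Int) ++ lst_.map some).take nn by simp]
  rw [goA_eq_dcSpec nn (lst_.length - nn) (List.replicate nn (none : Option Int) ++ lst_.map some)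
        lst_ PySem.Set.empty (by simp) (by omega)]
  rw [dcSpec_eq_foldl_range, altB_eq_foldl_range]
  by_cases hM : 2 * nn ≤ lst_.length
  · rw [show lst_.length - nn = nn + (lst_.length - 2 * nn) by omega, List.range_add,
      List.foldl_append, foldl_range_pad nn lst_ _ nn (le_refl nn), List.foldl_map]
    congr 1
    funext C j
    exact dcCondShift nn j lst_ C
  · rw [show lst_.length - 2 * nn = 0 by omega]
    exact foldl_range_pad nn lst_ _ (lst_.length - nn) (by omega)
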